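-- pv_equiv track=rewrite | github.com/NUSTM/COQE | Baseline_Systems/data_generator_utils/data_generator.py | select_comparative_sentence
-- ===== SOURCE A (Python) =====
-- def select_comparative_sentence(data_col):
--     token_col, pos_col, keyword_col, elem_token_label_col, label_feature_col, sent_label_col = data_col
--
--     new_token_col, new_pos_col, new_keyword_col = [], [], []
--     new_elem_token_label_col, new_label_feature_col = [], []
--     for index in range(len(sent_label_col)):
--         if sent_label_col[index] == 1:
--             new_token_col.append(token_col[index])
--             new_pos_col.append(pos_col[index])
--             new_keyword_col.append(keyword_col[index])
--             new_elem_token_label_col.append(elem_token_label_col[index])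
--             new_label_feature_col.append(label_feature_col[index])
--
--     return new_token_col, new_pos_col, new_keyword_col, new_elem_token_label_col, new_label_feature_col
-- ===== SOURCE B (Python) =====
-- def select_comparative_sentence(data_col):
--     token_col, pos_col, keyword_col, elem_token_label_col, label_feature_col, sent_label_col = data_col
--     rows = [r[:5] for r in zip(token_col, pos_col, keyword_col,
--                                elem_token_label_col, label_feature_col, sent_label_col)
--             if r[5] == 1]
--     if not rows:
--         return [], [], [], [], []
--     cols = zip(*rows)
--     return tuple(list(c) for c in cols)
-- ===== Notes on version B (the rewrite author's own statement) =====
-- stated objective: alternative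
-- what changed: Instead of A's index loop appending to five separate column accumulators, B zips the six columns into rows, filters the rows whose sentence label is 1, and transposes the surviving rows back into five columns with zip(*rows).
import Mathlib
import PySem

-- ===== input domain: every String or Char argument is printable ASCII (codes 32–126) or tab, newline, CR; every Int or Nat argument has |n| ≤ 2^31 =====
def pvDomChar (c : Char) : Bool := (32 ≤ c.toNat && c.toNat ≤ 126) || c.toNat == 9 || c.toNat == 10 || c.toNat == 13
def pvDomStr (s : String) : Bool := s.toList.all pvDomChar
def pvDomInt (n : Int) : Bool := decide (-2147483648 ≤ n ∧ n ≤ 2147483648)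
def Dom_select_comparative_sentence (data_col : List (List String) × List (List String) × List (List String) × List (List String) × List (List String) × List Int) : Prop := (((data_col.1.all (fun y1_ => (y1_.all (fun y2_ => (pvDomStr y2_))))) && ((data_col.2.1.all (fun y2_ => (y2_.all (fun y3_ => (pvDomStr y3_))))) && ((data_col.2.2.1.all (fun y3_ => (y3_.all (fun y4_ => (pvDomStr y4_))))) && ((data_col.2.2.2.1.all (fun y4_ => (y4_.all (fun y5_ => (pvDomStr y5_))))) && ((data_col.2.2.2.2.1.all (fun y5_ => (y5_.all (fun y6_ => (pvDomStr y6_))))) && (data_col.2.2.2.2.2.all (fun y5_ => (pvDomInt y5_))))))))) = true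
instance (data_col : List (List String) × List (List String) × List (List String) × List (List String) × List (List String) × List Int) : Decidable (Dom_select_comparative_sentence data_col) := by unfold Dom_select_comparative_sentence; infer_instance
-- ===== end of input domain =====

-- B replaces A's index loop over five separate columns by a row-wise view: zip the six
-- columns into rows, filter the rows by label, transpose back (objective: alternative).

-- ===== PORT A =====
-- literal transliteration of A: one pass over range(len(sent_label_col)) appending
-- to five accumulators when sent_label_col[index] == 1 (pyGetD default [] / 0 is
-- only reached outside Pre_, where Python raises IndexError)
def select_comparative_sentence (data_col : List (List String) × List (List String) × List (List String) × List (List String) × List (List String) × List Int) : List (List String) × List (List String) × List (List String) × List (List String) × List (List String) :=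
  match data_col with
  | (token_col, pos_col, keyword_col, elem_token_label_col, label_feature_col, sent_label_col) =>
    (PySem.List.pyRange 0 sent_label_col.length 1).foldl
      (fun acc index =>
        if PySem.List.pyGetD sent_label_col index 0 == 1 then
          (acc.1 ++ [PySem.List.pyGetD token_col index []],
           acc.2.1 ++ [PySem.List.pyGetD pos_col index []],
           acc.2.2.1 ++ [PySem.List.pyGetD keyword_col index []],
           acc.2.2.2.1 ++ [PySem.List.pyGetD elem_token_label_col index []],
           acc.2.2.2.2 ++ [PySem.List.pyGetD label_feature_col index []])
        else acc)
      ([], [], [], [], [])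

-- ===== PORT B =====
-- six-way zip, exactly Python's zip: stops at the shortest of the six columns
def pvZip6 (t p k e l : List (List String)) (s : List Int) :
    List ((List String × List String × List String × List String × List String) × Int) :=
  match t, p, k, e, l, s with
  | t0 :: t', p0 :: p', k0 :: k', e0 :: e', l0 :: l', s0 :: s' =>
      ((t0, p0, k0, e0, l0), s0) :: pvZip6 t' p' k' e' l' s'
  | _, _, _, _, _, _ => []

-- literal transliteration of B: rows = [r[:5] for r in zip(...) if r[5]==1]; then the
-- empty check; zip(*rows) on fixed-width 5-tuples is exactly the five projections
def select_comparative_sentence_alt (data_col : List (List String) × List (List String) × List (List String) × List (List String) × List (List String) × List Int) : List (List String) × List (List String) × List (List String) × List (List String) × List (List String) :=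
  match data_col with
  | (token_col, pos_col, keyword_col, elem_token_label_col, label_feature_col, sent_label_col) =>
    let rows := ((pvZip6 token_col pos_col keyword_col elem_token_label_col label_feature_col sent_label_col).filter
      (fun r => r.2 == 1)).map Prod.fst
    match rows with
    | [] => ([], [], [], [], [])
    | _ =>
      (rows.map (fun r => r.1),
       rows.map (fun r => r.2.1),
       rows.map (fun r => r.2.2.1),
       rows.map (fun r => r.2.2.2.1),
       rows.map (fun r => r.2.2.2.2))

-- ===== PRECONDITION & SPEC =====
-- Pre_ excludes exactly the inputs where Python A raises IndexError: a matching
-- index (sent_label_col[i] == 1) that is out of range for one of the five columns.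
def Pre_select_comparative_sentence (data_col : List (List String) × List (List String) × List (List String) × List (List String) × List (List String) × List Int) : Prop :=
  ((List.range data_col.2.2.2.2.2.length).all (fun i =>
    !(data_col.2.2.2.2.2.getD i 0 == 1) ||
    (decide (i < data_col.1.length) && decide (i < data_col.2.1.length) &&
     decide (i < data_col.2.2.1.length) && decide (i < data_col.2.2.2.1.length) &&
     decide (i < data_col.2.2.2.2.1.length)))) = true
instance (data_col : List (List String) × List (List String) × List (List String) × List (List String) × List (List String) × List Int) : Decidable (Pre_select_comparative_sentence data_col) := by unfold Pre_select_comparative_sentence; infer_instance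

def pvWitness_select_comparative_sentence : (List (List String) × List (List String) × List (List String) × List (List String) × List (List String) × List Int) :=
  ([["a"], ["b"]], [["NN"], ["VB"]], [["k"], ["l"]], [["0"], ["1"]], [["x"], ["y"]], [0, 1])

def Spec_select_comparative_sentence (data_col : List (List String) × List (List String) × List (List String) × List (List String) × List (List String) × List Int) (out : List (List String) × List (List String) × List (List String) × List (List String) × List (List String)) : Prop := out = select_comparative_sentence_alt data_col
instance (data_col : List (List String) × List (List String) × List (List String) × List (List String) × List (List String) × List Int) (out : List (List String) × List (List String) × List (List String) × List (List String) × List (List String)) : Decidable (Spec_select_comparative_sentence data_col out) := by unfold Spec_select_comparative_sentence; infer_instance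

-- ===== CLAIM (what is proved, stated in full; the proofs are below) =====
def Claim_equal_select_comparative_sentence : Prop := ∀ (data_col : List (List String) × List (List String) × List (List String) × List (List String) × List (List String) × List Int), Dom_select_comparative_sentence data_col → Pre_select_comparative_sentence data_col → Spec_select_comparative_sentence data_col (select_comparative_sentence data_col)


-- ===== LEMMAS AND PROOFS =====

-- A's accumulating fold equals prefixes ++ the per-column gathers over the filtered list.
theorem pv_fold_eq_filter_map (p : Int → Bool) (f1 f2 f3 f4 f5 : Int → List String)
    (l : List Int) (a b c d e : List (List String)) :
    l.foldl
      (fun acc i =>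
        if p i then
          (acc.1 ++ [f1 i], acc.2.1 ++ [f2 i], acc.2.2.1 ++ [f3 i],
           acc.2.2.2.1 ++ [f4 i], acc.2.2.2.2 ++ [f5 i])
        else acc)
      (a, b, c, d, e)
    = (a ++ (l.filter p).map f1, b ++ (l.filter p).map f2, c ++ (l.filter p).map f3,
       d ++ (l.filter p).map f4, e ++ (l.filter p).map f5) := by
  induction l generalizing a b c d e with
  | nil => simp
  | cons x xs ih =>
    by_cases hx : p x
    · simp [List.foldl_cons, hx, ih]
    · simp [List.foldl_cons, hx, ih]

-- the Int-indexed gather over pyRange is the Nat-indexed gather over List.range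
theorem pv_gather_natCast (s : List Int) (c : List (List String)) :
    ((PySem.List.pyRange 0 (s.length : Int) 1).filter
        (fun i => PySem.List.pyGetD s i 0 == 1)).map
      (fun i => PySem.List.pyGetD c i []) =
    ((List.range s.length).filter (fun i => s.getD i 0 == 1)).map
      (fun i => c.getD i []) := by
  simp [PySem.List.pyRange_one, List.filter_map, List.map_map, Function.comp_def]

-- the row-wise filtered zip equals the index-wise gather, given that every
-- matching index is in range of each of the five columns
theorem pv_zip_eq_gather :
    ∀ (s : List Int) (t p k e l : List (List String)),
    (∀ i, i < s.length → s.getD i 0 = 1 →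
      i < t.length ∧ i < p.length ∧ i < k.length ∧ i < e.length ∧ i < l.length) →
    ((pvZip6 t p k e l s).filter (fun r => r.2 == 1)).map Prod.fst
    = ((List.range s.length).filter (fun i => s.getD i 0 == 1)).map
        (fun i => (t.getD i [], p.getD i [], k.getD i [], e.getD i [], l.getD i [])) := by
  intro s
  induction s with
  | nil => intro t p k e l _; cases t <;> cases p <;> cases k <;> cases e <;> cases l <;> simp [pvZip6]
  | cons s0 s' ih =>
    intro t p k e l h
    have hshift : ∀ i, i < s'.length → s'.getD i 0 = 1 →
        i + 1 < t.length ∧ i + 1 < p.length ∧ i + 1 < k.length ∧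
        i + 1 < e.length ∧ i + 1 < l.length := by
      intro i hi h1
      exact h (i + 1) (by simpa using Nat.succ_lt_succ hi) (by simpa using h1)
    have hrange : List.range (s'.length + 1)
        = 0 :: (List.range s'.length).map (· + 1) := by
      simp [List.range_succ_eq_map]
    by_cases h0 : s0 = 1
    · -- a matching head row: all five columns must be nonempty
      obtain ⟨ht, hp, hk, he, hl⟩ := h 0 (by simp) (by simpa using h0)
      match t, p, k, e, l with
      | t0 :: t', p0 :: p', k0 :: k', e0 :: e', l0 :: l' =>
        have hih := ih t' p' k' e' l' (by
          intro i hi h1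
          have h5 := hshift i hi h1
          simp only [List.length_cons] at h5
          omega)
        simp [pvZip6, hrange, h0, List.filter_map, List.map_map, Function.comp_def, hih]
    · match t, p, k, e, l with
      | t0 :: t', p0 :: p', k0 :: k', e0 :: e', l0 :: l' =>
        have hih := ih t' p' k' e' l' (by
          intro i hi h1
          have h5 := hshift i hi h1
          simp only [List.length_cons] at h5
          omega)
        simp [pvZip6, hrange, h0, List.filter_map, List.map_map, Function.comp_def, hih]
      | [], _, _, _, _ =>
        have hnm : ∀ i, i < s'.length → ¬ s'.getD i 0 = 1 := by
          intro i hi h1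
          have h5 := hshift i hi h1
          simp only [List.length_nil] at h5
          omega
        simp [pvZip6, hrange, h0, List.filter_map, Function.comp_def]
        exact fun a ha => by simpa using hnm a ha
      | _ :: _, [], _, _, _ =>
        have hnm : ∀ i, i < s'.length → ¬ s'.getD i 0 = 1 := by
          intro i hi h1
          have h5 := hshift i hi h1
          simp only [List.length_nil, List.length_cons] at h5
          omega
        simp [pvZip6, hrange, h0, List.filter_map, Function.comp_def]
        exact fun a ha => by simpa using hnm a ha
      | _ :: _, _ :: _, [], _, _ =>
        have hnm : ∀ i, i < s'.length → ¬ s'.getD i 0 = 1 := by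
          intro i hi h1
          have h5 := hshift i hi h1
          simp only [List.length_nil, List.length_cons] at h5
          omega
        simp [pvZip6, hrange, h0, List.filter_map, Function.comp_def]
        exact fun a ha => by simpa using hnm a ha
      | _ :: _, _ :: _, _ :: _, [], _ =>
        have hnm : ∀ i, i < s'.length → ¬ s'.getD i 0 = 1 := by
          intro i hi h1
          have h5 := hshift i hi h1
          simp only [List.length_nil, List.length_cons] at h5
          omega
        simp [pvZip6, hrange, h0, List.filter_map, Function.comp_def]
        exact fun a ha => by simpa using hnm a ha
      | _ :: _, _ :: _, _ :: _, _ :: _, [] =>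
        have hnm : ∀ i, i < s'.length → ¬ s'.getD i 0 = 1 := by
          intro i hi h1
          have h5 := hshift i hi h1
          simp only [List.length_nil, List.length_cons] at h5
          omega
        simp [pvZip6, hrange, h0, List.filter_map, Function.comp_def]
        exact fun a ha => by simpa using hnm a ha

-- B's port with the empty-rows match resolved: always the five projections of rows
theorem pv_alt_unfold (tok pos kw elem lab : List (List String)) (sent : List Int) :
    select_comparative_sentence_alt (tok, pos, kw, elem, lab, sent)
    = (let rows := ((pvZip6 tok pos kw elem lab sent).filter (fun r => r.2 == 1)).map Prod.fst
       (rows.map (fun r => r.1), rows.map (fun r => r.2.1), rows.map (fun r => r.2.2.1),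
        rows.map (fun r => r.2.2.2.1), rows.map (fun r => r.2.2.2.2))) := by
  unfold select_comparative_sentence_alt
  rcases hr : ((pvZip6 tok pos kw elem lab sent).filter (fun r => r.2 == 1)).map Prod.fst with
    _ | ⟨r0, rs⟩ <;> simp [hr]

-- ===== VERDICT (by name: the statement is the Claim_ definition above) =====
theorem select_comparative_sentence_spec : Claim_equal_select_comparative_sentence := by
  intro data_col _ hpre
  obtain ⟨tok, pos, kw, elem, lab, sent⟩ := data_col
  have hcond : ∀ i, i < sent.length → sent.getD i 0 = 1 →
      i < tok.length ∧ i < pos.length ∧ i < kw.length ∧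
      i < elem.length ∧ i < lab.length := by
    unfold Pre_select_comparative_sentence at hpre
    simp only [List.all_eq_true, List.mem_range, Bool.or_eq_true, Bool.not_eq_true',
      beq_eq_false_iff_ne, ne_eq, Bool.and_eq_true, decide_eq_true_eq] at hpre
    intro i hi h1
    rcases hpre i hi with hne | hlt
    · exact absurd h1 hne
    · exact ⟨hlt.1.1.1.1, hlt.1.1.1.2, hlt.1.1.2, hlt.1.2, hlt.2⟩
  have hz := pv_zip_eq_gather sent tok pos kw elem lab hcond
  unfold Spec_select_comparative_sentence
  rw [pv_alt_unfold]
  unfold select_comparative_sentence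
  dsimp only
  rw [pv_fold_eq_filter_map]
  simp only [List.nil_append, hz, List.map_map, Function.comp_def, pv_gather_natCast]
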